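-- pv_equiv track=rewrite | github.com/MonkeykingLy/COMP9321 | ass2.py | check_input_order
-- ===== SOURCE A (Python) =====
-- def check_input_order(input_list):
-- 	temp=set()
-- 	for i in input_list:
-- 		temp.add(i.strip("+-"))
--
-- 	if len(temp)==len(input_list):
-- 		return True # all of orders are correct
-- 	else:
-- 		return False # it has reflect order like {+id,-id}
-- ===== SOURCE B (Python) =====
-- def check_input_order(input_list):
--     stripped = sorted(i.strip("+-") for i in input_list)
--     for prev, cur in zip(stripped, stripped[1:]):
--         if prev == cur:
--             return False
--     return True
-- ===== Notes on version B (the rewrite author's own statement) =====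
-- stated objective: alternative
-- what changed: Replaced the hash-set size comparison with sorting the stripped values and a single adjacent-pair scan that returns False on the first repeated neighbour (with early exit).
import Mathlib
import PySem

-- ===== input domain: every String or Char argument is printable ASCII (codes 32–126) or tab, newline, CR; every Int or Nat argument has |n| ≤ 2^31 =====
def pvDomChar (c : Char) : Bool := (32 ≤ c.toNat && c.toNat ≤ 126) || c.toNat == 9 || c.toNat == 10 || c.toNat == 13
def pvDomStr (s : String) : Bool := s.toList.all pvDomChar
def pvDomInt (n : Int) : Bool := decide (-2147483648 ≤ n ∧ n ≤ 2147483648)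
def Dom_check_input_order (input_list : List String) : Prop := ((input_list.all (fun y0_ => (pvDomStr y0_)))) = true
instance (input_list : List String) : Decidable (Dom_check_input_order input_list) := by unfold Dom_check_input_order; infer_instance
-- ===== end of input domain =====

-- B sorts the stripped values and scans adjacent pairs for a repeat, instead of comparing a hash-set's size to the list length (alternative decomposition, same results).


-- ===== PORT A =====
def check_input_order (input_list : List String) : Bool :=
  let temp : PySem.Set String :=
    input_list.foldl (fun s i => PySem.Set.add s (PySem.Str.stripChars i "+-")) PySem.Set.empty
  if PySem.Set.len temp = input_list.length then true else false

-- ===== PORT B =====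
-- the adjacent-pair scan: 'for prev, cur in zip(stripped, stripped[1:]): if prev == cur: return False'
def pvAdjScan : List String → Bool
  | a :: b :: rest => if a == b then false else pvAdjScan (b :: rest)
  | _ => true

def check_input_order_alt (input_list : List String) : Bool :=
  let stripped :=
    PySem.List.sorted (input_list.map (fun i => PySem.Str.stripChars i "+-")) (fun x => x) false
  pvAdjScan stripped

-- ===== PRECONDITION & SPEC =====
def Spec_check_input_order (input_list : List String) (out : Bool) : Prop := out = check_input_order_alt input_list
instance (input_list : List String) (out : Bool) : Decidable (Spec_check_input_order input_list out) := by unfold Spec_check_input_order; infer_instance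

-- ===== CLAIM (what is proved, stated in full; the proofs are below) =====
def Claim_equal_check_input_order : Prop := ∀ (input_list : List String), Dom_check_input_order input_list → Spec_check_input_order input_list (check_input_order input_list)

-- ===== LEMMAS AND PROOFS =====

-- distinct-count of a Python set equals the list length iff the list has no duplicates
theorem pv_len_ofList_eq_iff {α : Type} [DecidableEq α] [BEq α] [LawfulBEq α] (L : List α) :
    (PySem.Set.ofList L).length = L.length ↔ L.Nodup := by
  constructor
  · intro h
    have hperm : (PySem.Set.ofList L).Perm L.dedup := by
      rw [List.perm_ext_iff_of_nodup (PySem.Set.nodup_ofList L) L.nodup_dedup]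
      intro a
      rw [PySem.Set.mem_ofList, List.mem_dedup]
    have hlen : L.dedup.length = L.length := by
      rw [← hperm.length_eq, h]
    have : L.dedup = L := L.dedup_sublist.eq_of_length hlen
    rw [← this]
    exact L.nodup_dedup
  · intro h
    rw [PySem.Set.ofList_eq_self_of_nodup L h]

-- on a (≤)-sorted list, the adjacent scan returns true iff there are no duplicates
theorem pv_adjScan_iff_nodup (ys : List String) (hs : ys.Pairwise (· ≤ ·)) :
    pvAdjScan ys = true ↔ ys.Nodup := by
  induction ys with
  | nil => simp [pvAdjScan]
  | cons a t ih =>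
    cases t with
    | nil => simp [pvAdjScan]
    | cons b r =>
      have hs' : (b :: r).Pairwise (· ≤ ·) := hs.tail
      have hab : a ≤ b := (List.pairwise_cons.mp hs).1 b (List.mem_cons_self)
      by_cases hEq : a = b
      · subst hEq
        simp [pvAdjScan]
      · have hne : (a == b) = false := by simp [hEq]
        rw [List.nodup_cons]
        constructor
        · intro h
          rw [pvAdjScan, hne] at h
          simp only [Bool.false_eq_true, if_false] at h
          refine ⟨?_, (ih hs').mp h⟩
          intro hmem
          rcases List.mem_cons.mp hmem with h1 | h2
          · exact hEq h1
          · have hba : b ≤ a := (List.pairwise_cons.mp hs').1 a h2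
            exact hEq (le_antisymm hab hba)
        · rintro ⟨_, hnd⟩
          rw [pvAdjScan, hne]
          simpa using (ih hs').mpr hnd

-- ===== VERDICT (by name: the statement is the Claim_ definition above) =====
theorem check_input_order_spec : Claim_equal_check_input_order := by
  intro xs _
  show check_input_order xs = check_input_order_alt xs
  unfold check_input_order check_input_order_alt
  have hA : xs.foldl (fun s i => PySem.Set.add s (PySem.Str.stripChars i "+-")) PySem.Set.empty
      = PySem.Set.ofList (xs.map (fun i => PySem.Str.stripChars i "+-")) := by
    rw [← PySem.Set.update_map_eq_foldl_add]
    exact PySem.Set.update_empty _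
  have hlen : (xs.map (fun i => PySem.Str.stripChars i "+-")).length = xs.length :=
    List.length_map ..
  simp only [hA, PySem.Set.len, ← hlen]
  generalize xs.map (fun i => PySem.Str.stripChars i "+-") = L
  have hsorted := PySem.List.sorted_perm L (fun x : String => x) false
  have hpw : (PySem.List.sorted L (fun x : String => x) false).Pairwise (· ≤ ·) := by
    simpa using PySem.List.sorted_pairwise L (fun x : String => x)
  by_cases hnd : L.Nodup
  · have h1 : (PySem.Set.ofList L).length = L.length := (pv_len_ofList_eq_iff L).mpr hnd
    have h2 : pvAdjScan (PySem.List.sorted L (fun x : String => x) false) = true :=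
      (pv_adjScan_iff_nodup _ hpw).mpr (hsorted.nodup_iff.mpr hnd)
    rw [h2, if_pos (by exact_mod_cast h1)]
  · have h1 : (PySem.Set.ofList L).length ≠ L.length :=
      fun h => hnd ((pv_len_ofList_eq_iff L).mp h)
    have h2 : pvAdjScan (PySem.List.sorted L (fun x : String => x) false) = false := by
      rcases Bool.eq_false_or_eq_true (pvAdjScan (PySem.List.sorted L (fun x : String => x) false)) with h | h
      · exact absurd (hsorted.nodup_iff.mp ((pv_adjScan_iff_nodup _ hpw).mp h)) hnd
      · exact h
    rw [h2, if_neg (by exact_mod_cast h1)]
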